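-- pv_equiv track=rewrite | github.com/Multi-CAST/multicastpy | src/multicastpy/refind.py | parse_referent_relations
-- ===== SOURCE A (Python) =====
-- import collections
--
-- def parse_referent_relations(s):
--     """
--     The relations of the referent to other referents; including < ‘set member of (partial
--     co-reference)’, < ‘includes (split antecedence)’, and M ‘part-whole’; referents with the
--     same relation are delimited by commata, and different types of relations by semicola,
--     e.g. > 0001, 0002; M 0003.
--     """
--     rels = collections.defaultdict(set)
--     for rel in s.split(';'):
--         rel = rel.strip()
--         if rel and rel[0] in '<>M':
--             rel, refs = rel[0], rel[1:]
--         else: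
--             rel, refs = '', rel
--         for ref in refs.split(','):
--             ref = ref.strip()
--             if ref:
--                 rels[rel].add(ref)
--     return {k: sorted(v) for k, v in rels.items()}
-- ===== SOURCE B (Python) =====
-- def parse_referent_relations(s):
--     """Flat-pair decomposition: collect (relation, ref) pairs in one list, then
--     group by first-occurrence key order; same result as the defaultdict(set) version."""
--     pairs = []
--     for seg in s.split(';'):
--         seg = seg.strip()
--         if seg and seg[0] in '<>M':
--             key, body = seg[0], seg[1:]
--         else:
--             key, body = '', seg
--         pairs.extend((key, r.strip()) for r in body.split(',') if r.strip())
--     keys = list(dict.fromkeys(k for k, _ in pairs))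
--     return {k: sorted({r for q, r in pairs if q == k}) for k in keys}
-- ===== Notes on version B (the rewrite author's own statement) =====
-- stated objective: alternative
-- what changed: Grouping by defaultdict(set) inside the loop is replaced by collecting one flat list of (relation, ref) pairs, then deduplicating keys in first-occurrence order and building each sorted unique ref list by a per-key pass over the pair list.
import Mathlib
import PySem

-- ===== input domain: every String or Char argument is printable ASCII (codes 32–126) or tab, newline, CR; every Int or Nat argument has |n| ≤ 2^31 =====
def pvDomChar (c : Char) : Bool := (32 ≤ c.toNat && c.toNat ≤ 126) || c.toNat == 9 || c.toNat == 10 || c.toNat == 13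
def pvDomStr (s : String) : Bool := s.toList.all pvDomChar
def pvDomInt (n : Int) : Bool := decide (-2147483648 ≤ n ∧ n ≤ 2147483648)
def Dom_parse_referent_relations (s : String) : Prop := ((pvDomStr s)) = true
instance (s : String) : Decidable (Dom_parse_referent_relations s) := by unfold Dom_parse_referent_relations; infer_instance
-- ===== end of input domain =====

-- B replaces A's grow-a-defaultdict(set) grouping by a flat (key, ref) pair list that is
-- deduplicated and grouped per first-occurrence key afterwards (objective: alternative).

-- ===== PORT A =====
-- 'rel and rel[0] in "<>M"': pyGet? rel 0 is `some c` exactly when rel is nonempty.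
-- s.split(';') / refs.split(',') via split? (exact: the separator is nonempty, so split? = some _).
def parse_referent_relations (s : String) : List (String × List String) :=
  let rels : PySem.Dict String (PySem.Set String) :=
    ((PySem.Str.split? s ";").getD []).foldl (fun rels rel0 =>
      let rel1 := PySem.Str.strip rel0
      let kr : String × String :=
        match PySem.Str.pyGet? rel1 0 with
        | some c =>
            if PySem.Str.isIn (String.singleton c) "<>M" then
              (String.singleton c, PySem.Str.slice rel1 (some 1) none)
            else ("", rel1)
        | none => ("", rel1)
      ((PySem.Str.split? kr.2 ",").getD []).foldl (fun rels ref0 =>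
        let ref := PySem.Str.strip ref0
        if ref ≠ "" then rels.modify kr.1 PySem.Set.empty (fun v => v.add ref)
        else rels) rels) PySem.Dict.empty
  rels.items.map (fun kv => (kv.1, PySem.List.sorted kv.2 (fun x => x)))

-- ===== PORT B =====
-- one segment of Source B's loop body: the list of (key, stripped ref) pairs it extends with
def pvSegPairs (rel0 : String) : List (String × String) :=
  let seg := PySem.Str.strip rel0
  let kb : String × String :=
    match PySem.Str.pyGet? seg 0 with
    | some c =>
        if PySem.Str.isIn (String.singleton c) "<>M" then
          (String.singleton c, PySem.Str.slice seg (some 1) none)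
        else ("", seg)
    | none => ("", seg)
  (((PySem.Str.split? kb.2 ",").getD []).filter
      (fun r => PySem.Str.strip r ≠ "")).map (fun r => (kb.1, PySem.Str.strip r))

def parse_referent_relations_alt (s : String) : List (String × List String) :=
  let pairs := ((PySem.Str.split? s ";").getD []).flatMap pvSegPairs
  let keys := PySem.List.dedup (pairs.map (·.1))
  keys.map (fun k =>
    (k, PySem.List.sorted
          (PySem.Set.ofList ((pairs.filter (fun p => p.1 == k)).map (·.2)))
          (fun x => x)))

-- ===== PRECONDITION & SPEC =====
def Spec_parse_referent_relations (s : String) (out : List (String × List String)) : Prop := out = parse_referent_relations_alt s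
instance (s : String) (out : List (String × List String)) : Decidable (Spec_parse_referent_relations s out) := by unfold Spec_parse_referent_relations; infer_instance

-- ===== CLAIM (what is proved, stated in full; the proofs are below) =====
def Claim_equal_parse_referent_relations : Prop := ∀ (s : String), Dom_parse_referent_relations s → Spec_parse_referent_relations s (parse_referent_relations s)

-- ===== LEMMAS AND PROOFS =====

-- the per-pair grouping step both sides reduce to
def pvGroupStep (d : PySem.Dict String (PySem.Set String)) (p : String × String) :
    PySem.Dict String (PySem.Set String) :=
  d.modify p.1 PySem.Set.empty (fun v => v.add p.2)

lemma pvGetD_foldl_group (l : List (String × String))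
    (d : PySem.Dict String (PySem.Set String)) (c : String) :
    (l.foldl pvGroupStep d).getD c PySem.Set.empty
      = PySem.Set.update (d.getD c PySem.Set.empty)
          ((l.filter (fun p => p.1 == c)).map (·.2)) := by
  induction l generalizing d with
  | nil => rfl
  | cons p t ih =>
      simp only [List.foldl_cons, ih, List.filter_cons]
      by_cases h : p.1 = c
      · simp [pvGroupStep, h, PySem.Set.update]
      · have hbeq : (p.1 == c) = false := by simp [h]
        simp [pvGroupStep, hbeq, PySem.Dict.getD_modify, Ne.symm h]

-- A's per-segment loop body equals folding pvGroupStep over pvSegPairs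
lemma pvSeg_step (rels : PySem.Dict String (PySem.Set String)) (rel0 : String) :
    (let rel1 := PySem.Str.strip rel0
     let kr : String × String :=
       match PySem.Str.pyGet? rel1 0 with
       | some c =>
           if PySem.Str.isIn (String.singleton c) "<>M" then
             (String.singleton c, PySem.Str.slice rel1 (some 1) none)
           else ("", rel1)
       | none => ("", rel1)
     ((PySem.Str.split? kr.2 ",").getD []).foldl (fun rels ref0 =>
       let ref := PySem.Str.strip ref0
       if ref ≠ "" then rels.modify kr.1 PySem.Set.empty (fun v => v.add ref)
       else rels) rels)
    = (pvSegPairs rel0).foldl pvGroupStep rels := by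
  simp only [pvSegPairs]
  rw [List.foldl_map]
  rw [← PySem.List.foldl_ite_eq_foldl_filter (p := fun r => PySem.Str.strip r ≠ "")
        (f := fun d r => pvGroupStep d (_, PySem.Str.strip r))]
  rfl

lemma pvDict_eq (s : String) :
    (((PySem.Str.split? s ";").getD []).foldl (fun rels rel0 =>
      let rel1 := PySem.Str.strip rel0
      let kr : String × String :=
        match PySem.Str.pyGet? rel1 0 with
        | some c =>
            if PySem.Str.isIn (String.singleton c) "<>M" then
              (String.singleton c, PySem.Str.slice rel1 (some 1) none)
            else ("", rel1)
        | none => ("", rel1)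
      ((PySem.Str.split? kr.2 ",").getD []).foldl (fun rels ref0 =>
        let ref := PySem.Str.strip ref0
        if ref ≠ "" then rels.modify kr.1 PySem.Set.empty (fun v => v.add ref)
        else rels) rels) PySem.Dict.empty)
    = (((PySem.Str.split? s ";").getD []).flatMap pvSegPairs).foldl pvGroupStep
        PySem.Dict.empty := by
  rw [List.foldl_flatMap]
  exact PySem.List.foldl_congr_mem _ _ _ _ (fun d rel0 _ => pvSeg_step d rel0)

-- ===== VERDICT (by name: the statement is the Claim_ definition above) =====
theorem parse_referent_relations_spec : Claim_equal_parse_referent_relations := by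
  intro s _
  show parse_referent_relations s = parse_referent_relations_alt s
  unfold parse_referent_relations parse_referent_relations_alt
  rw [pvDict_eq s]
  generalize ((PySem.Str.split? s ";").getD []).flatMap pvSegPairs = P
  show (P.foldl pvGroupStep PySem.Dict.empty).items.map
      (fun kv => (kv.1, PySem.List.sorted kv.2 (fun x => x)))
    = (PySem.List.dedup (P.map (·.1))).map (fun k =>
        (k, PySem.List.sorted
              (PySem.Set.ofList ((P.filter (fun p => p.1 == k)).map (·.2)))
              (fun x => x)))
  have hgs : (fun (d : PySem.Dict String (PySem.Set String)) (p : String × String) =>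
      d.modify p.1 PySem.Set.empty (fun v => v.add p.2)) = pvGroupStep := rfl
  have hnd : (P.foldl pvGroupStep PySem.Dict.empty).keys.Nodup := by
    rw [← hgs]
    exact PySem.Dict.nodup_keys_foldl_modify_key P (·.1) PySem.Set.empty
      (fun d p => fun v => v.add p.2) PySem.Dict.empty (by simp [PySem.Dict.empty])
  have hkeys : (P.foldl pvGroupStep PySem.Dict.empty).keys
      = PySem.List.dedup (P.map (·.1)) := by
    rw [← hgs]
    rw [PySem.Dict.keys_foldl_modify_key P (·.1) PySem.Set.empty
      (fun d p => fun v => v.add p.2) PySem.Dict.empty]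
    simp [PySem.Dict.empty, PySem.Dict.keys, PySem.Set.update_nil_left,
      PySem.List.dedup_eq_ofList]
  rw [PySem.Dict.items_eq_map_keys _ hnd PySem.Set.empty, hkeys, List.map_map]
  refine List.map_congr_left (fun k _ => ?_)
  simp only [Function.comp]
  rw [pvGetD_foldl_group]
  have : (PySem.Dict.empty : PySem.Dict String (PySem.Set String)).getD k PySem.Set.empty
      = PySem.Set.empty := rfl
  rw [this, PySem.Set.update_empty]
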